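-- pv_equiv track=rewrite | github.com/RandomNick7/WebCLI | go2web.py | highlightJSON
-- ===== SOURCE A (Python) =====
-- c = {
--     "black": "\033[90m",
--     "red": "\033[91m",
--     "green": "\033[92m",
--     "yellow": "\033[93m",
--     "blue": "\033[94m",
--     "mangenta": "\033[95m",
--     "cyan": "\033[96m",
--     "white": "\033[97m",
--     "none": "\033[0m"
-- }
--
-- def highlightJSON(soup):
--     for s in ["[","]"]:
--         soup = soup.replace(s, (c['yellow']+ s +c['none']))
--     for s in ["\"","'"]:
--         soup = soup.replace(s, (c['green']+ s +c['none']))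
--     for s in ["{","}"]:
--         soup = soup.replace(s, (c['red']+ s +c['none']))
--     for s in [":"]:
--         soup = soup.replace(s, (c['yellow']+ s +c['none']))
--     return soup
-- ===== SOURCE B (Python) =====
-- c = {
--     "black": "\033[90m",
--     "red": "\033[91m",
--     "green": "\033[92m",
--     "yellow": "\033[93m",
--     "blue": "\033[94m",
--     "mangenta": "\033[95m",
--     "cyan": "\033[96m",
--     "white": "\033[97m",
--     "none": "\033[0m"
-- }
--
-- _TABLE = {
--     "[": c['yellow'] + "[" + c['none'],
--     "]": c['yellow'] + "]" + c['none'],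
--     "\"": c['green'] + "\"" + c['none'],
--     "'": c['green'] + "'" + c['none'],
--     "{": c['red'] + "{" + c['none'],
--     "}": c['red'] + "}" + c['none'],
--     ":": c['yellow'] + ":" + c['none'],
-- }
--
-- def highlightJSON(soup):
--     return "".join(_TABLE.get(ch, ch) for ch in soup)
-- ===== Notes on version B (the rewrite author's own statement) =====
-- stated objective: simpler
-- what changed: Replaces A's seven sequential full-string str.replace passes by a single pass over the characters with a precomputed char-to-colored-string table, joining the mapped pieces.
import Mathlib
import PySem

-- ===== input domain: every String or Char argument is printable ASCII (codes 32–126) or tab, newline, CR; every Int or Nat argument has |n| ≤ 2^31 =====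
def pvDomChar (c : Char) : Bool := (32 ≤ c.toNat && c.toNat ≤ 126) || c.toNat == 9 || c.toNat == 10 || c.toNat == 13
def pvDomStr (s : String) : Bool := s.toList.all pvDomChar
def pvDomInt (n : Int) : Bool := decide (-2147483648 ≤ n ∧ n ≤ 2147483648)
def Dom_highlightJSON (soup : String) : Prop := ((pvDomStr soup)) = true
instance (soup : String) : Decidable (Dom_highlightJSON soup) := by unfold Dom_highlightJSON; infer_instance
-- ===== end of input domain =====

-- B replaces A's seven full-string str.replace passes by one table-driven pass over the characters (objective: simpler).

-- ===== PORT A =====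
-- the module-level colour dict `c`
def cDict : PySem.Dict String String := PySem.Dict.ofList
  [("black", "\x1B[90m"), ("red", "\x1B[91m"), ("green", "\x1B[92m"),
   ("yellow", "\x1B[93m"), ("blue", "\x1B[94m"), ("mangenta", "\x1B[95m"),
   ("cyan", "\x1B[96m"), ("white", "\x1B[97m"), ("none", "\x1B[0m")]

def highlightJSON (soup : String) : String :=
  let soup := ["[", "]"].foldl
    (fun soup s => PySem.Str.replace soup s (cDict.getD "yellow" "" ++ s ++ cDict.getD "none" "")) soup
  let soup := ["\"", "'"].foldl
    (fun soup s => PySem.Str.replace soup s (cDict.getD "green" "" ++ s ++ cDict.getD "none" "")) soup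
  let soup := ["{", "}"].foldl
    (fun soup s => PySem.Str.replace soup s (cDict.getD "red" "" ++ s ++ cDict.getD "none" "")) soup
  let soup := [":"].foldl
    (fun soup s => PySem.Str.replace soup s (cDict.getD "yellow" "" ++ s ++ cDict.getD "none" "")) soup
  soup

-- ===== PORT B =====
-- Source B's _TABLE, built from the same colour dict
def hlTable : PySem.Dict Char String := PySem.Dict.ofList
  [('[', cDict.getD "yellow" "" ++ "[" ++ cDict.getD "none" ""),
   (']', cDict.getD "yellow" "" ++ "]" ++ cDict.getD "none" ""),
   ('"', cDict.getD "green" "" ++ "\"" ++ cDict.getD "none" ""),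
   ('\'', cDict.getD "green" "" ++ "'" ++ cDict.getD "none" ""),
   ('{', cDict.getD "red" "" ++ "{" ++ cDict.getD "none" ""),
   ('}', cDict.getD "red" "" ++ "}" ++ cDict.getD "none" ""),
   (':', cDict.getD "yellow" "" ++ ":" ++ cDict.getD "none" "")]

def highlightJSON_alt (soup : String) : String :=
  PySem.Str.join "" (soup.toList.map (fun ch => hlTable.getD ch (String.ofList [ch])))

-- ===== PRECONDITION & SPEC =====
def Spec_highlightJSON (soup : String) (out : String) : Prop := out = highlightJSON_alt soup
instance (soup : String) (out : String) : Decidable (Spec_highlightJSON soup out) := by unfold Spec_highlightJSON; infer_instance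

-- ===== CLAIM (what is proved, stated in full; the proofs are below) =====
def Claim_equal_highlightJSON : Prop := ∀ (soup : String), Dom_highlightJSON soup → Spec_highlightJSON soup (highlightJSON soup)

-- ===== LEMMAS AND PROOFS =====

-- A single-character str.replace is a flatMap over the characters.
theorem replace_go_single (c : Char) (new : List Char) : ∀ (fuel : Nat) (l acc : List Char), l.length ≤ fuel →
    PySem.Chars.replace.go [c] new fuel l acc
      = acc.reverse ++ l.flatMap (fun x => if x = c then new else [x]) := by
  intro fuel
  induction fuel with
  | zero => intro l acc h; cases l with
    | nil => simp [PySem.Chars.replace.go]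
    | cons a t => simp at h
  | succ f ih =>
    intro l acc h
    cases l with
    | nil => simp [PySem.Chars.replace.go]
    | cons a t =>
      simp only [PySem.Chars.replace.go]
      by_cases hac : a = c
      · subst hac
        have hp : [a].isPrefixOf (a :: t) = true := by simp [List.isPrefixOf]
        simp only [hp, if_true, List.length_cons] at *
        have hd : List.drop (([] : List Char).length + 1) (a :: t) = t := by simp
        rw [hd, ih t (new.reverse ++ acc) (by omega)]
        simp
      · have hp : [c].isPrefixOf (a :: t) = false := by
          simp [List.isPrefixOf]; exact fun h => absurd h.symm hac
        simp only [hp, Bool.false_eq_true, List.length_cons] at *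
        rw [ih t (a :: acc) (by omega)]
        simp [hac]

theorem replace_single (s : List Char) (c : Char) (new : List Char) :
    PySem.Chars.replace s [c] new = s.flatMap (fun x => if x = c then new else [x]) := by
  have : ([c] : List Char).isEmpty = false := by simp
  simp only [PySem.Chars.replace, this, Bool.false_eq_true, if_false]
  rw [replace_go_single c new s.length s [] le_rfl]
  simp

-- join with the empty separator is flatten
theorem join_empty (ps : List (List Char)) : PySem.Chars.join [] ps = ps.flatten := by
  induction ps with
  | nil => rfl
  | cons h t ih =>
    cases t with
    | nil => simp [PySem.Chars.join, List.intercalate]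
    | cons h2 t2 =>
      simp [PySem.Chars.join, List.intercalate, List.intersperse] at *
      simpa using ih

-- abbreviations for the seven single-character substitutions, in A's order
def subst1 (c : Char) (new : List Char) : List Char → List Char :=
  fun l => l.flatMap (fun x => if x = c then new else [x])

def chainA : List Char → List Char :=
  fun l => subst1 ':' "\x1B[93m:\x1B[0m".toList
    (subst1 '}' "\x1B[91m}\x1B[0m".toList
      (subst1 '{' "\x1B[91m{\x1B[0m".toList
        (subst1 '\'' "\x1B[92m'\x1B[0m".toList
          (subst1 '"' "\x1B[92m\"\x1B[0m".toList
            (subst1 ']' "\x1B[93m]\x1B[0m".toList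
              (subst1 '[' "\x1B[93m[\x1B[0m".toList l))))))

theorem toList_highlightJSON (soup : String) :
    (highlightJSON soup).toList = chainA soup.toList := by
  show (highlightJSON soup).toList = _
  simp only [highlightJSON, List.foldl, chainA, subst1]
  simp only [PySem.Str.toList_replace]
  have e1 : ("\x1B[93m" : String) = cDict.getD "yellow" "" := by decide
  have e2 : ("\x1B[92m" : String) = cDict.getD "green" "" := by decide
  have e3 : ("\x1B[91m" : String) = cDict.getD "red" "" := by decide
  have e4 : ("\x1B[0m" : String) = cDict.getD "none" "" := by decide
  rw [← e1, ← e2, ← e3, ← e4]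
  simp only [String.toList_append]
  have t1 : ("[" : String).toList = ['['] := rfl
  have t2 : ("]" : String).toList = [']'] := rfl
  have t3 : ("\"" : String).toList = ['"'] := rfl
  have t4 : ("'" : String).toList = ['\''] := rfl
  have t5 : ("{" : String).toList = ['{'] := rfl
  have t6 : ("}" : String).toList = ['}'] := rfl
  have t7 : (":" : String).toList = [':'] := rfl
  have n1 : ("\x1B[93m" : String).toList ++ ("[" : String).toList ++ ("\x1B[0m" : String).toList = ("\x1B[93m[\x1B[0m" : String).toList := rfl
  have n2 : ("\x1B[93m" : String).toList ++ ("]" : String).toList ++ ("\x1B[0m" : String).toList = ("\x1B[93m]\x1B[0m" : String).toList := rfl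
  have n3 : ("\x1B[92m" : String).toList ++ ("\"" : String).toList ++ ("\x1B[0m" : String).toList = ("\x1B[92m\"\x1B[0m" : String).toList := rfl
  have n4 : ("\x1B[92m" : String).toList ++ ("'" : String).toList ++ ("\x1B[0m" : String).toList = ("\x1B[92m'\x1B[0m" : String).toList := rfl
  have n5 : ("\x1B[91m" : String).toList ++ ("{" : String).toList ++ ("\x1B[0m" : String).toList = ("\x1B[91m{\x1B[0m" : String).toList := rfl
  have n6 : ("\x1B[91m" : String).toList ++ ("}" : String).toList ++ ("\x1B[0m" : String).toList = ("\x1B[91m}\x1B[0m" : String).toList := rfl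
  have n7 : ("\x1B[93m" : String).toList ++ (":" : String).toList ++ ("\x1B[0m" : String).toList = ("\x1B[93m:\x1B[0m" : String).toList := rfl
  rw [n1, n2, n3, n4, n5, n6, n7, t1, t2, t3, t4, t5, t6, t7]
  simp only [replace_single]

-- the per-character value of the chained substitutions equals B's table lookup
theorem chain_char (x : Char) :
    chainA [x] = (hlTable.getD x (String.ofList [x])).toList := by
  by_cases h1 : x = '['
  · subst h1; decide
  by_cases h2 : x = ']'
  · subst h2; decide
  by_cases h3 : x = '"'
  · subst h3; decide
  by_cases h4 : x = '\''
  · subst h4; decide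
  by_cases h5 : x = '{'
  · subst h5; decide
  by_cases h6 : x = '}'
  · subst h6; decide
  by_cases h7 : x = ':'
  · subst h7; decide
  · have hx : chainA [x] = [x] := by
      simp [chainA, subst1, h1, h2, h3, h4, h5, h6, h7]
    rw [hx]
    simp only [hlTable, PySem.Dict.ofList, PySem.Dict.update, List.foldl,
      PySem.Dict.getD_insert, h1, h2, h3, h4, h5, h6, h7, if_false]
    simp [PySem.Dict.getD, PySem.Dict.get?, PySem.Dict.empty]

theorem chainA_flatMap (l : List Char) : chainA l = l.flatMap (fun x => chainA [x]) := by
  simp only [chainA, subst1]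
  simp only [List.flatMap_assoc]
  simp

theorem toList_alt (soup : String) :
    (highlightJSON_alt soup).toList = soup.toList.flatMap (fun x => (hlTable.getD x (String.ofList [x])).toList) := by
  simp only [highlightJSON_alt, PySem.Str.toList_join]
  rw [show ("" : String).toList = [] from rfl, join_empty]
  simp [List.flatMap, Function.comp_def]

-- ===== VERDICT (by name: the statement is the Claim_ definition above) =====
theorem highlightJSON_spec : Claim_equal_highlightJSON := by
  intro soup _
  show highlightJSON soup = highlightJSON_alt soup
  have h : (highlightJSON soup).toList = (highlightJSON_alt soup).toList := by
    rw [toList_highlightJSON, toList_alt, chainA_flatMap]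
    exact List.flatMap_congr (fun x _ => chain_char x)
  have := congrArg String.ofList h
  simpa using this
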